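-- pv_equiv track=rewrite | github.com/c0rmac/interlink-alg | interlink-alg-py/interlink_alg.py | interlink_alg
-- ===== SOURCE A (Python) =====
-- from collections import defaultdict
--
-- def traverse_chain(sub_char, chars_set, char_to_chars, unravelled_elements, element_identifier):
--     if all(c in unravelled_elements for c in chars_set) or sub_char in unravelled_elements:
--         return
--
--     for char in chars_set:
--         element_identifier.add(char)
--     unravelled_elements.add(sub_char)
--
--     if sub_char in char_to_chars:
--         sub_chars_set = char_to_chars[sub_char]
--         for sub_char_in_set in sub_chars_set:
--             traverse_chain(sub_char_in_set, sub_chars_set, char_to_chars, unravelled_elements, element_identifier)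
--
-- def interlink_alg(interlinks):
--     # Step 1: Build char_to_chars map
--     # Time Complexity: O(M * L^2) where M is the number of words and L is the average length of words
--     char_to_chars = defaultdict(set)
--     for word in interlinks:
--         for char in word:
--             chars_set = char_to_chars[char]
--             for char_in_word in word:
--                 chars_set.add(char_in_word)
--
--     unravelled_elements = set()
--     identifiers = []
--
--     # Step 2: Traverse chains and identify elements
--     # Time Complexity: O(2C + C^2) where C is the number of unique characters in the alphabet
--     for char, chars_set in char_to_chars.items():
--         if all(c in unravelled_elements for c in chars_set):
--             continue
--
--         element_identifier = set(chars_set)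
--
--         for c in chars_set:
--             traverse_chain(c, chars_set, char_to_chars, unravelled_elements, element_identifier)
--
--         unravelled_elements.update(chars_set)
--         identifiers.append(element_identifier)
--
--     return identifiers
-- ===== SOURCE B (Python) =====
-- def interlink_alg(interlinks):
--     # Merge-overlapping-sets algorithm: no co-occurrence graph is built and no
--     # traversal is performed.  The disjoint components found so far are kept as
--     # a list of sets; each word's character set is unioned with every component
--     # it touches, the merged component taking the slot of the earliest
--     # component it touched (a brand-new component is appended at the end).
--     components = []
--     for word in interlinks:
--         ws = set(word)
--         if not ws:
--             continue
--         merged = set(ws)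
--         for comp in components:
--             if comp & ws:
--                 merged |= comp
--         out = []
--         placed = False
--         for comp in components:
--             if comp & ws:
--                 if not placed:
--                     out.append(merged)
--                     placed = True
--             else:
--                 out.append(comp)
--         if not placed:
--             out.append(merged)
--         components = out
--     return components
-- ===== Notes on version B (the rewrite author's own statement) =====
-- stated objective: faster
-- what changed: A builds a per-character co-occurrence map (quadratic per word) and recursively traverses chains to collect each component; B builds no graph and traverses nothing: it keeps the components found so far as a list of disjoint sets and, in one pass over the words, unions each word's character set with every component it touches, the merged set taking the slot of the earliest touched component.
import Mathlib
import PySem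

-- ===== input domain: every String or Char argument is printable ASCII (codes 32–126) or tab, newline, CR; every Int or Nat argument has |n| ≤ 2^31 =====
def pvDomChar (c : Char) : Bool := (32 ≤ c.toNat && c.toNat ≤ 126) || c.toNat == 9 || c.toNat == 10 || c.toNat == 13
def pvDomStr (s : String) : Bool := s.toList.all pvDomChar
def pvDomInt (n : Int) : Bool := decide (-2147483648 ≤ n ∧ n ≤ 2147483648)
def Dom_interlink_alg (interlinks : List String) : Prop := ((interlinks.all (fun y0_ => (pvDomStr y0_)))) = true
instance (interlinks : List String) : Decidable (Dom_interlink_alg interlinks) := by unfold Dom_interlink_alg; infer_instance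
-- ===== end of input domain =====

-- B replaces A's per-character co-occurrence map plus recursive chain traversal by a
-- single pass that merges each word's character set into a list of disjoint components
-- (no graph, no traversal); measurably faster on long words.
-- Both Pythons return a list of Python SETS, whose hash iteration order is not modelled:
-- both ports return each set canonically sorted (pvCanon); the proved equality is about
-- these set values (and the outer list order), which is all the Python output determines.

-- canonical rendering of a Python set of 1-character strings (shared by both ports)
def pvCanon (s : List Char) : List String :=
  (s.mergeSort (fun a b => decide (a ≤ b))).map (fun c => String.ofList [c])

-- ===== PORT A =====
-- step 1 of A: for word: for char in word: char_to_chars[char].add(every char_in_word)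
def pvBuildA (interlinks : List String) : PySem.Dict Char (List Char) :=
  interlinks.foldl (fun M word =>
    word.toList.foldl (fun M c =>
      M.insert c (PySem.Set.update (M.getD c []) word.toList)) M) PySem.Dict.empty

-- traverse_chain; the Nat argument is fuel (a totality guard only: an entered call always
-- marks a fresh key, so depth is bounded by the number of keys and the fuel below suffices).
-- The loops iterate Python sets in insertion order; the proofs show the returned sets do
-- not depend on that order.
def pvTravA (M : PySem.Dict Char (List Char)) :
    Nat → Char → List Char → List Char × List Char → List Char × List Char
  | 0, _, _, st => st
  | Nat.succ f, x, S, st =>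
    if S.all (fun c => PySem.Set.contains st.1 c) || PySem.Set.contains st.1 x then st
    else
      let ident := PySem.Set.update st.2 S
      let unr := PySem.Set.add st.1 x
      match M.get? x with
      | some S2 => S2.foldl (fun st2 y => pvTravA M f y S2 st2) (unr, ident)
      | none => (unr, ident)

def interlink_alg (interlinks : List String) : List (List String) :=
  let M := pvBuildA interlinks
  let fuel := M.size + 1
  (M.items.foldl (fun (st : List Char × List (List Char)) cS =>
      if (cS.2).all (fun c => PySem.Set.contains st.1 c) then st
      else
        let ident := PySem.Set.ofList cS.2
        let r := (cS.2).foldl (fun st2 x => pvTravA M fuel x cS.2 st2) (st.1, ident)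
        (PySem.Set.update r.1 cS.2, st.2 ++ [r.2])) ([], [])).2.map pvCanon

-- ===== PORT B =====
-- one word of B: union the word's character set with every component it touches; the
-- merged set takes the slot of the earliest touched component, a fresh one goes last
def pvStepB (components : List (List Char)) (word : String) : List (List Char) :=
  let ws := PySem.Set.ofList word.toList
  if ws.isEmpty then components
  else
    let merged := components.foldl (fun m comp =>
        if (PySem.Set.inter comp ws).isEmpty then m else PySem.Set.union m comp) ws
    let r := components.foldl (fun (st : List (List Char) × Bool) comp =>
        if (PySem.Set.inter comp ws).isEmpty then (st.1 ++ [comp], st.2)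
        else if st.2 then st else (st.1 ++ [merged], true)) ([], false)
    if r.2 then r.1 else r.1 ++ [merged]

def interlink_alg_alt (interlinks : List String) : List (List String) :=
  (interlinks.foldl pvStepB []).map pvCanon

-- ===== PRECONDITION & SPEC =====
def Spec_interlink_alg (interlinks : List String) (out : List (List String)) : Prop := out = interlink_alg_alt interlinks
instance (interlinks : List String) (out : List (List String)) : Decidable (Spec_interlink_alg interlinks out) := by unfold Spec_interlink_alg; infer_instance

-- ===== CLAIM (what is proved, stated in full; the proofs are below) =====
def Claim_equal_interlink_alg : Prop := ∀ (interlinks : List String), Dom_interlink_alg interlinks → Spec_interlink_alg interlinks (interlink_alg interlinks)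

-- ===== LEMMAS AND PROOFS =====

-- the character stream of the input, the co-occurrence relation, its connectivity
def pvStream (il : List String) : List Char := il.flatMap String.toList

def pvRel (il : List String) (a b : Char) : Prop := ∃ w ∈ il, a ∈ w.toList ∧ b ∈ w.toList

def pvConn (il : List String) : Char → Char → Prop := Relation.ReflTransGen (pvRel il)

-- index of the first character of the stream belonging to A
def pvFirst (il : List String) (A : List Char) : Nat :=
  (pvStream il).findIdx (fun c => decide (c ∈ A))

-- "out is THE list of connected components, in order of first appearance"
def pvComps (il : List String) (out : List (List Char)) : Prop :=
  (∀ A ∈ out, A ≠ [] ∧ A.Nodup ∧ ∀ a ∈ A, a ∈ pvStream il) ∧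
  (∀ A ∈ out, ∀ a ∈ A, ∀ d, (d ∈ A ↔ pvConn il a d)) ∧
  (∀ c ∈ pvStream il, ∃ A ∈ out, c ∈ A) ∧
  out.Pairwise (fun A B => pvFirst il A < pvFirst il B)

-- ---- generic facts ----

lemma pvRel_symm (il : List String) (a b : Char) (h : pvRel il a b) : pvRel il b a := by
  obtain ⟨w, hw, h1, h2⟩ := h; exact ⟨w, hw, h2, h1⟩

lemma pvConn_symm (il : List String) {a b : Char} (h : pvConn il a b) : pvConn il b a := by
  induction h with
  | refl => exact Relation.ReflTransGen.refl
  | tail _ hbc ih => exact Relation.ReflTransGen.head (pvRel_symm il _ _ hbc) ih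

lemma pvRel_left_mem (il : List String) {a b : Char} (h : pvRel il a b) : a ∈ pvStream il := by
  obtain ⟨w, hw, h1, _⟩ := h
  exact List.mem_flatMap.mpr ⟨w, hw, h1⟩

lemma pvRel_right_mem (il : List String) {a b : Char} (h : pvRel il a b) : b ∈ pvStream il :=
  pvRel_left_mem il (pvRel_symm il _ _ h)

lemma pvConn_mem (il : List String) {a b : Char} (ha : a ∈ pvStream il) (h : pvConn il a b) :
    b ∈ pvStream il := by
  induction h with
  | refl => exact ha
  | tail _ hbc _ => exact pvRel_right_mem il hbc

lemma pvFindIdx_le {α : Type} (l : List α) (p : α → Bool) (j : Nat) (hj : j < l.length)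
    (h : p l[j] = true) : l.findIdx p ≤ j := by
  by_contra hc
  have := List.not_of_lt_findIdx (by omega : j < l.findIdx p)
  exact Bool.false_ne_true (this.symm.trans h)

-- pvFirst of a set containing k whose members all appear no earlier than k
lemma pvFirst_eq_idx (il : List String) (A : List Char) (k : Char)
    (hk : k ∈ A) (hkS : k ∈ pvStream il)
    (hmin : ∀ a ∈ A, (pvStream il).idxOf k ≤ (pvStream il).idxOf a) :
    pvFirst il A = (pvStream il).idxOf k := by
  have hlen : (pvStream il).idxOf k < (pvStream il).length := List.idxOf_lt_length_of_mem hkS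
  have hget : (pvStream il)[(pvStream il).idxOf k] = k := List.getElem_idxOf hlen
  have hle : pvFirst il A ≤ (pvStream il).idxOf k := by
    apply pvFindIdx_le _ _ _ hlen
    simp [hget, hk]
  rcases Nat.lt_or_ge (pvFirst il A) ((pvStream il).idxOf k) with hlt | hge
  · exfalso
    have hflt : pvFirst il A < (pvStream il).length := by omega
    have hmem : (pvStream il)[pvFirst il A] ∈ A := by
      have := List.findIdx_getElem (w := hflt)
      simpa using this
    have h1 : (pvStream il).idxOf ((pvStream il)[pvFirst il A]) ≤ pvFirst il A := by
      apply pvFindIdx_le _ _ _ hflt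
      simp
    have h2 := hmin _ hmem
    omega
  · omega

-- ---- uniqueness: two pvComps lists agree pointwise as sets ----

lemma pvFindIdx_congr {α : Type} (l : List α) (p q : α → Bool) (h : ∀ x ∈ l, p x = q x) :
    l.findIdx p = l.findIdx q := by
  induction l with
  | nil => rfl
  | cons a l ih =>
      simp only [List.findIdx_cons, h a (by simp)]
      rw [ih (fun x hx => h x (by simp [hx]))]

-- the clauses of pvComps except coverage
def pvCl (il : List String) (out : List (List Char)) : Prop :=
  (∀ A ∈ out, A ≠ [] ∧ A.Nodup ∧ ∀ a ∈ A, a ∈ pvStream il) ∧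
  (∀ A ∈ out, ∀ a ∈ A, ∀ d, (d ∈ A ↔ pvConn il a d)) ∧
  out.Pairwise (fun A B => pvFirst il A < pvFirst il B)

-- two equally-covering pvCl lists agree pointwise as sets
lemma pvCl_unique (il : List String) : ∀ (L1 L2 : List (List Char)),
    pvCl il L1 → pvCl il L2 → (∀ c, (∃ A ∈ L1, c ∈ A) ↔ (∃ B ∈ L2, c ∈ B)) →
    List.Forall₂ (fun A B => ∀ x, x ∈ A ↔ x ∈ B) L1 L2 := by
  intro L1
  induction L1 with
  | nil =>
      intro L2 _ h2 hcov
      cases L2 with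
      | nil => exact List.Forall₂.nil
      | cons B T2 =>
          exfalso
          obtain ⟨b, hb⟩ := List.exists_mem_of_ne_nil B (h2.1 B (by simp)).1
          have := hcov b |>.mpr ⟨B, by simp, hb⟩
          simp at this
  | cons A T1 ih =>
      intro L2 h1 h2 hcov
      -- the head of L1 is nonempty with occurring members
      obtain ⟨a0, ha0⟩ := List.exists_mem_of_ne_nil A (h1.1 A (by simp)).1
      have ha0S : a0 ∈ pvStream il := (h1.1 A (by simp)).2.2 a0 ha0
      cases L2 with
      | nil =>
          exfalso
          have := hcov a0 |>.mp ⟨A, by simp, ha0⟩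
          simp at this
      | cons A2 T2 =>
          obtain ⟨b0, hb0⟩ := List.exists_mem_of_ne_nil A2 (h2.1 A2 (by simp)).1
          have hb0S : b0 ∈ pvStream il := (h2.1 A2 (by simp)).2.2 b0 hb0
          -- first indices of the heads
          have hm1lt : pvFirst il A < (pvStream il).length := by
            apply List.findIdx_lt_length.mpr
            exact ⟨a0, ha0S, by simp [ha0]⟩
          have hm2lt : pvFirst il A2 < (pvStream il).length := by
            apply List.findIdx_lt_length.mpr
            exact ⟨b0, hb0S, by simp [hb0]⟩
          have hc1A : (pvStream il)[pvFirst il A] ∈ A := by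
            have := List.findIdx_getElem (w := hm1lt)
            simpa using this
          have hc2A2 : (pvStream il)[pvFirst il A2] ∈ A2 := by
            have := List.findIdx_getElem (w := hm2lt)
            simpa using this
          -- heads have minimal pvFirst within their own lists
          have hA1min : ∀ B ∈ A :: T1, pvFirst il A ≤ pvFirst il B := by
            intro B hB
            rcases List.mem_cons.mp hB with h | h
            · rw [h]
            · exact le_of_lt (List.rel_of_pairwise_cons h1.2.2 h)
          have hA2min : ∀ B ∈ A2 :: T2, pvFirst il A2 ≤ pvFirst il B := by
            intro B hB
            rcases List.mem_cons.mp hB with h | h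
            · rw [h]
            · exact le_of_lt (List.rel_of_pairwise_cons h2.2.2 h)
          -- each head's first char is covered by the other list at index ≤
          obtain ⟨B2, hB2m, hB2⟩ := hcov _ |>.mp ⟨A, by simp, hc1A⟩
          obtain ⟨B1, hB1m, hB1⟩ := hcov _ |>.mpr ⟨A2, by simp, hc2A2⟩
          have h12 : pvFirst il B2 ≤ pvFirst il A :=
            pvFindIdx_le _ _ _ hm1lt (by simp [hB2])
          have h21 : pvFirst il B1 ≤ pvFirst il A2 :=
            pvFindIdx_le _ _ _ hm2lt (by simp [hB1])
          have hm12 : pvFirst il A = pvFirst il A2 := by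
            have := hA1min B1 hB1m
            have := hA2min B2 hB2m
            omega
          -- B2 must be the head A2
          have hB2eq : pvFirst il B2 = pvFirst il A2 := by
            have := hA2min B2 hB2m
            omega
          have hc1A2 : (pvStream il)[pvFirst il A] ∈ A2 := by
            rcases List.mem_cons.mp hB2m with h | h
            · rwa [h] at hB2
            · exfalso
              have := List.rel_of_pairwise_cons h2.2.2 h
              omega
          -- the heads are set-equal
          have hheads : ∀ x, x ∈ A ↔ x ∈ A2 := by
            intro x
            rw [h1.2.1 A (by simp) _ hc1A x, h2.2.1 A2 (by simp) _ hc1A2 x]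
          -- a component sharing an element with the head equals it, contradiction with pairwise
          have hsame : ∀ (L : List (List Char)), pvCl il L → ∀ H T c, L = H :: T →
              c ∈ H → ∀ X ∈ T, c ∈ X → False := by
            rintro L hL H T c rfl hcH X hX hcX
            have hXeq : ∀ d, d ∈ X ↔ d ∈ H := by
              intro d
              rw [hL.2.1 X (by simp [hX]) c hcX d, hL.2.1 H (by simp) c hcH d]
            have : pvFirst il X = pvFirst il H := by
              unfold pvFirst
              exact pvFindIdx_congr _ _ _ (fun y _ => by simp [hXeq y])
            have := List.rel_of_pairwise_cons hL.2.2 hX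
            omega
          -- coverage for the tails
          have hcovT : ∀ c, (∃ X ∈ T1, c ∈ X) ↔ (∃ Y ∈ T2, c ∈ Y) := by
            intro c
            constructor
            · rintro ⟨X, hX, hcX⟩
              have hcnA : c ∉ A := fun hcA => hsame (A :: T1) h1 A T1 c rfl hcA X hX hcX
              obtain ⟨Y, hY, hcY⟩ := hcov c |>.mp ⟨X, by simp [hX], hcX⟩
              rcases List.mem_cons.mp hY with h | h
              · exfalso; rw [h] at hcY; exact hcnA ((hheads c).mpr hcY)
              · exact ⟨Y, h, hcY⟩
            · rintro ⟨Y, hY, hcY⟩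
              have hcnA2 : c ∉ A2 := fun hcA => hsame (A2 :: T2) h2 A2 T2 c rfl hcA Y hY hcY
              obtain ⟨X, hX, hcX⟩ := hcov c |>.mpr ⟨Y, by simp [hY], hcY⟩
              rcases List.mem_cons.mp hX with h | h
              · exfalso; rw [h] at hcX; exact hcnA2 ((hheads c).mp hcX)
              · exact ⟨X, h, hcX⟩
          refine List.Forall₂.cons hheads (ih T2 ?_ ?_ hcovT)
          · exact ⟨fun X hX => h1.1 X (by simp [hX]), fun X hX => h1.2.1 X (by simp [hX]),
              (List.pairwise_cons.mp h1.2.2).2⟩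
          · exact ⟨fun X hX => h2.1 X (by simp [hX]), fun X hX => h2.2.1 X (by simp [hX]),
              (List.pairwise_cons.mp h2.2.2).2⟩

lemma pvComps_unique (il : List String) (L1 L2 : List (List Char))
    (h1 : pvComps il L1) (h2 : pvComps il L2) :
    List.Forall₂ (fun A B => ∀ x, x ∈ A ↔ x ∈ B) L1 L2 := by
  apply pvCl_unique il L1 L2 ⟨h1.1, h1.2.1, h1.2.2.2⟩ ⟨h2.1, h2.2.1, h2.2.2.2⟩
  intro c
  constructor
  · rintro ⟨A, hA, hcA⟩
    exact h2.2.2.1 c ((h1.1 A hA).2.2 c hcA)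
  · rintro ⟨B, hB, hcB⟩
    exact h1.2.2.1 c ((h2.1 B hB).2.2 c hcB)

lemma pvCanon_congr (A B : List Char) (hA : A.Nodup) (hB : B.Nodup)
    (h : ∀ x, x ∈ A ↔ x ∈ B) : pvCanon A = pvCanon B := by
  unfold pvCanon
  congr 1
  have hperm : A.Perm B := (List.perm_ext_iff_of_nodup hA hB).mpr h
  have hp : (A.mergeSort (fun a b => decide (a ≤ b))).Perm (B.mergeSort (fun a b => decide (a ≤ b))) :=
    ((List.mergeSort_perm A _).trans hperm).trans (List.mergeSort_perm B _).symm
  apply List.Perm.eq_of_pairwise (le := fun a b => decide (a ≤ b) = true) ?_ ?_ ?_ hp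
  · intro a b _ _ h1 h2
    simp only [decide_eq_true_eq] at h1 h2
    exact le_antisymm h1 h2
  · exact List.sorted_mergeSort (by intro a b c h1 h2; simp only [decide_eq_true_eq] at *; exact le_trans h1 h2)
      (by intro a b; simp only [Bool.or_eq_true, decide_eq_true_eq]; exact le_total a b) A
  · exact List.sorted_mergeSort (by intro a b c h1 h2; simp only [decide_eq_true_eq] at *; exact le_trans h1 h2)
      (by intro a b; simp only [Bool.or_eq_true, decide_eq_true_eq]; exact le_total a b) B

-- ---- the build map of A ----

lemma pvStream_append (p q : List String) : pvStream (p ++ q) = pvStream p ++ pvStream q := by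
  unfold pvStream; simp

lemma pvStream_singleton (w : String) : pvStream [w] = w.toList := by
  unfold pvStream; simp

lemma pvRel_append_singleton (p : List String) (w : String) (c d : Char) :
    pvRel (p ++ [w]) c d ↔ pvRel p c d ∨ (c ∈ w.toList ∧ d ∈ w.toList) := by
  unfold pvRel
  constructor
  · rintro ⟨v, hv, h1, h2⟩
    rcases List.mem_append.mp hv with h | h
    · exact Or.inl ⟨v, h, h1, h2⟩
    · simp only [List.mem_singleton] at h; subst h; exact Or.inr ⟨h1, h2⟩
  · rintro (⟨v, hv, h1, h2⟩ | ⟨h1, h2⟩)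
    · exact ⟨v, List.mem_append.mpr (Or.inl hv), h1, h2⟩
    · exact ⟨w, List.mem_append.mpr (Or.inr (by simp)), h1, h2⟩

lemma pvInner_getD (cs : List Char) : ∀ (l : List Char) (M : PySem.Dict Char (List Char)) (c d : Char),
    d ∈ ((l.foldl (fun M x => M.insert x (PySem.Set.update (M.getD x []) cs)) M).getD c []) ↔
      d ∈ M.getD c [] ∨ (c ∈ l ∧ d ∈ cs) := by
  intro l
  induction l with
  | nil => simp
  | cons x l ih =>
      intro M c d
      rw [List.foldl_cons, ih]
      rw [PySem.Dict.getD_insert]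
      by_cases hcx : c = x
      · subst hcx
        rw [if_pos rfl, PySem.Set.mem_update]
        simp only [List.mem_cons]
        tauto
      · rw [if_neg hcx]
        simp only [List.mem_cons]
        tauto

lemma pvInner_nodup (cs : List Char) : ∀ (l : List Char) (M : PySem.Dict Char (List Char)),
    (∀ c, (M.getD c []).Nodup) →
    ∀ c, ((l.foldl (fun M x => M.insert x (PySem.Set.update (M.getD x []) cs)) M).getD c []).Nodup := by
  intro l
  induction l with
  | nil => intro M h c; exact h c
  | cons x l ih =>
      intro M h c
      rw [List.foldl_cons]
      apply ih
      intro c'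
      rw [PySem.Dict.getD_insert]
      split_ifs with hc
      · exact PySem.Set.nodup_update _ _ (h x)
      · exact h c'

lemma pvBuildA_aux : ∀ (rest : List String) (M : PySem.Dict Char (List Char)) (p : List String),
    (∀ c d, d ∈ M.getD c [] ↔ pvRel p c d) →
    (M.keys = PySem.Set.ofList (pvStream p)) →
    (∀ c, (M.getD c []).Nodup) →
    (∀ c d, d ∈ ((rest.foldl (fun M word => word.toList.foldl (fun M c =>
        M.insert c (PySem.Set.update (M.getD c []) word.toList)) M) M).getD c []) ↔ pvRel (p ++ rest) c d) ∧
    ((rest.foldl (fun M word => word.toList.foldl (fun M c =>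
        M.insert c (PySem.Set.update (M.getD c []) word.toList)) M) M).keys
      = PySem.Set.ofList (pvStream (p ++ rest))) ∧
    (∀ c, ((rest.foldl (fun M word => word.toList.foldl (fun M c =>
        M.insert c (PySem.Set.update (M.getD c []) word.toList)) M) M).getD c []).Nodup) := by
  intro rest
  induction rest with
  | nil => intro M p h1 h2 h3; simpa using ⟨h1, h2, h3⟩
  | cons w rest ih =>
      intro M p h1 h2 h3
      rw [List.foldl_cons]
      have hstep := ih (w.toList.foldl (fun M c =>
          M.insert c (PySem.Set.update (M.getD c []) w.toList)) M) (p ++ [w]) ?_ ?_ ?_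
      · constructor
        · intro c d
          rw [hstep.1 c d, show (p ++ [w]) ++ rest = p ++ w :: rest by simp]
        · refine ⟨?_, ?_⟩
          · rw [hstep.2.1, show (p ++ [w]) ++ rest = p ++ w :: rest by simp]
          · intro c; exact hstep.2.2 c
      · intro c d
        rw [pvInner_getD, h1, pvRel_append_singleton]
      · rw [PySem.Dict.keys_foldl_insert, h2, pvStream_append, pvStream_singleton,
          PySem.Set.ofList_append]
      · exact pvInner_nodup _ _ _ h3

lemma pvBuildA_getD_mem (il : List String) (c d : Char) :
    d ∈ (pvBuildA il).getD c [] ↔ pvRel il c d := by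
  have := (pvBuildA_aux il PySem.Dict.empty [] (by simp [pvRel]) (by simp [pvStream]) (by simp)).1 c d
  simpa [pvBuildA] using this

lemma pvBuildA_keys (il : List String) :
    (pvBuildA il).keys = PySem.Set.ofList (pvStream il) := by
  have := (pvBuildA_aux il PySem.Dict.empty [] (by simp [pvRel]) (by simp [pvStream]) (by simp)).2.1
  simpa [pvBuildA] using this

-- ---- A-side: infrastructure ----

lemma pvRel_self (il : List String) (c : Char) (h : c ∈ pvStream il) : pvRel il c c := by
  obtain ⟨w, hw, hc⟩ := List.mem_flatMap.mp h
  exact ⟨w, hw, hc, hc⟩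

-- ofList keeps first occurrences in order of first index
lemma pvOfList_pairwise_idxOf (l : List Char) :
    (PySem.Set.ofList l).Pairwise (fun a b => l.idxOf a < l.idxOf b) := by
  induction l with
  | nil => rw [PySem.Set.ofList_nil]; exact List.Pairwise.nil
  | cons x xs ih =>
      rw [PySem.Set.ofList_cons]
      refine List.pairwise_cons.mpr ⟨?_, ?_⟩
      · intro a ha
        obtain ⟨haS, hax⟩ := (PySem.Set.mem_discard _ _ _).mp ha
        have h1 : List.idxOf x (x :: xs) = 0 := by simp
        have h2 : List.idxOf a (x :: xs) = List.idxOf a xs + 1 := by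
          rw [List.idxOf_cons]
          have : (x == a) = false := by
            cases h : (x == a)
            · rfl
            · exact absurd (beq_iff_eq.mp h).symm hax
          rw [this]
          rfl
        omega
      · have hsub : (PySem.Set.discard (PySem.Set.ofList xs) x).Sublist (PySem.Set.ofList xs) := by
          unfold PySem.Set.discard
          exact List.filter_sublist
        refine (List.Pairwise.sublist hsub ih).imp_of_mem ?_
        intro a b ha hb hab
        obtain ⟨-, hax⟩ := (PySem.Set.mem_discard _ _ _).mp ha
        obtain ⟨-, hbx⟩ := (PySem.Set.mem_discard _ _ _).mp hb
        have h2 : List.idxOf a (x :: xs) = List.idxOf a xs + 1 := by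
          rw [List.idxOf_cons]
          have : (x == a) = false := by
            cases h : (x == a)
            · rfl
            · exact absurd (beq_iff_eq.mp h).symm hax
          rw [this]; rfl
        have h3 : List.idxOf b (x :: xs) = List.idxOf b xs + 1 := by
          rw [List.idxOf_cons]
          have : (x == b) = false := by
            cases h : (x == b)
            · rfl
            · exact absurd (beq_iff_eq.mp h).symm hbx
          rw [this]; rfl
        omega

-- number of keys not yet unravelled: the DFS fuel measure
def pvUnseen (M : PySem.Dict Char (List Char)) (u : List Char) : Nat :=
  M.keys.countP (fun k => !(PySem.Set.contains u k))

lemma pvUnseen_le (M : PySem.Dict Char (List Char)) (u : List Char) : pvUnseen M u ≤ M.size := by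
  unfold pvUnseen
  have h1 : M.keys.countP (fun k => !(PySem.Set.contains u k)) ≤ M.keys.length :=
    List.countP_le_length
  have h2 : M.keys.length = M.size := by
    simp [PySem.Dict.keys, PySem.Dict.size]
  omega

lemma pvUnseen_mono (M : PySem.Dict Char (List Char)) {u u' : List Char}
    (h : ∀ a ∈ u, a ∈ u') : pvUnseen M u' ≤ pvUnseen M u := by
  apply List.countP_mono_left
  intro x _ hx
  simp only [Bool.not_eq_true'] at hx ⊢
  cases hcu : PySem.Set.contains u x
  · rfl
  · exfalso
    have hxu := (PySem.Set.contains_iff u x).mp hcu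
    rw [(PySem.Set.contains_iff u' x).mpr (h x hxu)] at hx
    cases hx

lemma pvUnseen_lt (M : PySem.Dict Char (List Char)) {u : List Char} {x : Char}
    (hx : x ∈ M.keys) (hxu : x ∉ u) :
    pvUnseen M (PySem.Set.add u x) < pvUnseen M u := by
  rw [PySem.Set.add_of_not_mem hxu]
  obtain ⟨l1, l2, hsplit⟩ := List.append_of_mem hx
  unfold pvUnseen
  rw [hsplit, List.countP_append, List.countP_append, List.countP_cons, List.countP_cons]
  have hpt : ∀ a : Char, (!(PySem.Set.contains (u ++ [x]) a)) = true →
      (!(PySem.Set.contains u a)) = true := by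
    intro a ha
    simp only [Bool.not_eq_true'] at ha ⊢
    cases hcu : PySem.Set.contains u a
    · rfl
    · exfalso
      have := (PySem.Set.contains_iff _ _).mp hcu
      rw [(PySem.Set.contains_iff (u ++ [x]) a).mpr (List.mem_append.mpr (Or.inl this))] at ha
      cases ha
  have h1 := List.countP_mono_left (l := l1) (fun a _ h => hpt a h)
  have h2 := List.countP_mono_left (l := l2) (fun a _ h => hpt a h)
  have hxo : (!(PySem.Set.contains u x)) = true := by
    simp only [Bool.not_eq_true']
    cases hcu : PySem.Set.contains u x
    · rfl
    · exact absurd ((PySem.Set.contains_iff u x).mp hcu) hxu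
  have hxn : (!(PySem.Set.contains (u ++ [x]) x)) = false := by
    have hmm : PySem.Set.contains (u ++ [x]) x = true :=
      (PySem.Set.contains_iff _ _).mpr (List.mem_append.mpr (Or.inr (by simp)))
    rw [hmm]
    rfl
  rw [if_pos hxo, if_neg (by rw [hxn]; exact Bool.false_ne_true)]
  omega

-- what one traverse_chain call (or a fold of them) guarantees about its state
def pvTravConcl (il : List String) (Kp : Char → Prop) (st r : List Char × List Char) : Prop :=
  (∀ a ∈ st.1, a ∈ r.1) ∧ (∀ a ∈ st.2, a ∈ r.2) ∧
  (∀ a ∈ r.1, a ∈ st.1 ∨ Kp a) ∧ (∀ a ∈ r.2, a ∈ st.2 ∨ Kp a) ∧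
  (∀ a ∈ r.1, a ∉ st.1 → (a ∈ r.2 ∧ ∀ d, pvRel il a d → d ∈ r.1)) ∧
  (st.1.Nodup → r.1.Nodup) ∧ (st.2.Nodup → r.2.Nodup)

lemma pvTravConcl_refl (il : List String) (Kp : Char → Prop) (st : List Char × List Char) :
    pvTravConcl il Kp st st :=
  ⟨fun _ h => h, fun _ h => h, fun _ h => Or.inl h, fun _ h => Or.inl h,
    fun _ ha hna => absurd ha hna, id, id⟩

lemma pvTravConcl_trans (il : List String) (Kp : Char → Prop)
    {st mid r : List Char × List Char}
    (h1 : pvTravConcl il Kp st mid) (h2 : pvTravConcl il Kp mid r) :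
    pvTravConcl il Kp st r := by
  obtain ⟨m1, m2, b1, b2, cl, n1, n2⟩ := h1
  obtain ⟨m1', m2', b1', b2', cl', n1', n2'⟩ := h2
  refine ⟨fun a h => m1' a (m1 a h), fun a h => m2' a (m2 a h), ?_, ?_, ?_,
    fun h => n1' (n1 h), fun h => n2' (n2 h)⟩
  · intro a h
    rcases b1' a h with h' | h'
    · exact b1 a h'
    · exact Or.inr h'
  · intro a h
    rcases b2' a h with h' | h'
    · exact b2 a h'
    · exact Or.inr h'
  · intro a har hnst
    by_cases hmid : a ∈ mid.1
    · obtain ⟨hid, hcl⟩ := cl a hmid hnst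
      exact ⟨m2' a hid, fun d hd => m1' d (hcl d hd)⟩
    · exact cl' a har hmid

-- the specification of pvTravA and of folds of pvTravA, by induction on fuel
lemma pvTrav_spec (M : PySem.Dict Char (List Char)) (il : List String) (Kp : Char → Prop)
    (hmem : ∀ c d, d ∈ M.getD c [] ↔ pvRel il c d)
    (hkeysiff : ∀ c, c ∈ M.keys ↔ c ∈ pvStream il)
    (hKcl : ∀ a, Kp a → ∀ d, pvRel il a d → Kp d)
    (hKocc : ∀ a, Kp a → a ∈ pvStream il) :
    ∀ f : Nat,
    (∀ (x : Char) (S : List Char) (st : List Char × List Char),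
      x ∈ S → (∀ a ∈ S, Kp a) → pvUnseen M st.1 < f →
      pvTravConcl il Kp st (pvTravA M f x S st) ∧ x ∈ (pvTravA M f x S st).1) ∧
    (∀ (ys S' : List Char) (st : List Char × List Char),
      (∀ y ∈ ys, y ∈ S') → (∀ a ∈ S', Kp a) → pvUnseen M st.1 < f →
      pvTravConcl il Kp st (ys.foldl (fun st2 y => pvTravA M f y S' st2) st) ∧
      (∀ y ∈ ys, y ∈ (ys.foldl (fun st2 y => pvTravA M f y S' st2) st).1)) := by
  intro f
  induction f with
  | zero =>
      constructor
      · intro x S st _ _ hu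
        omega
      · intro ys S' st _ _ hu
        omega
  | succ f ihf =>
      have htrav : ∀ (x : Char) (S : List Char) (st : List Char × List Char),
          x ∈ S → (∀ a ∈ S, Kp a) → pvUnseen M st.1 < f + 1 →
          pvTravConcl il Kp st (pvTravA M (f + 1) x S st) ∧ x ∈ (pvTravA M (f + 1) x S st).1 := by
        intro x S st hxS hSK hu
        show pvTravConcl il Kp st (pvTravA M (Nat.succ f) x S st) ∧ _
        rw [pvTravA]
        by_cases hg : (S.all (fun c => PySem.Set.contains st.1 c) || PySem.Set.contains st.1 x) = true
        · rw [if_pos hg]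
          refine ⟨pvTravConcl_refl il Kp st, ?_⟩
          have hg2 : S.all (fun c => PySem.Set.contains st.1 c) = true ∨
              PySem.Set.contains st.1 x = true := by
            cases h1 : S.all (fun c => PySem.Set.contains st.1 c)
            · cases h2 : PySem.Set.contains st.1 x
              · rw [h1, h2] at hg; cases hg
              · exact Or.inr rfl
            · exact Or.inl rfl
          rcases hg2 with h | h
          · exact (PySem.Set.contains_iff _ _).mp (List.all_eq_true.mp h x hxS)
          · exact (PySem.Set.contains_iff _ _).mp h
        · rw [if_neg hg]
          have hgg : S.all (fun c => PySem.Set.contains st.1 c) = false ∧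
              PySem.Set.contains st.1 x = false := by
            constructor
            · cases h : S.all (fun c => PySem.Set.contains st.1 c)
              · rfl
              · exact absurd (by rw [h]; simp) hg
            · cases h : PySem.Set.contains st.1 x
              · rfl
              · exact absurd (by rw [h]; simp) hg
          have hxnot : x ∉ st.1 := by
            intro h
            rw [(PySem.Set.contains_iff _ _).mpr h] at hgg
            exact absurd hgg.2 (by simp)
          have hxK : x ∈ M.keys := (hkeysiff x).mpr (hKocc x (hSK x hxS))
          have hu2 : pvUnseen M (PySem.Set.add st.1 x) < f := by
            have := pvUnseen_lt M hxK hxnot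
            omega
          have hbase : (∀ a ∈ st.1, a ∈ PySem.Set.add st.1 x) ∧
              (∀ a ∈ st.2, a ∈ PySem.Set.update st.2 S) ∧
              (∀ a ∈ PySem.Set.add st.1 x, a ∈ st.1 ∨ Kp a) ∧
              (∀ a ∈ PySem.Set.update st.2 S, a ∈ st.2 ∨ Kp a) ∧
              (st.1.Nodup → (PySem.Set.add st.1 x).Nodup) ∧
              (st.2.Nodup → (PySem.Set.update st.2 S).Nodup) ∧
              (∀ a, a ∈ PySem.Set.add st.1 x → a ∉ st.1 → a = x) := by
            refine ⟨?_, ?_, ?_, ?_, ?_, ?_, ?_⟩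
            · intro a h
              exact (PySem.Set.mem_add _ _ _).mpr (Or.inl h)
            · intro a h
              exact (PySem.Set.mem_update _ _ _).mpr (Or.inl h)
            · intro a h
              rcases (PySem.Set.mem_add _ _ _).mp h with h | rfl
              · exact Or.inl h
              · exact Or.inr (hSK a hxS)
            · intro a h
              rcases (PySem.Set.mem_update _ _ _).mp h with h | h
              · exact Or.inl h
              · exact Or.inr (hSK a h)
            · intro h
              exact PySem.Set.nodup_add _ _ h
            · intro h
              exact PySem.Set.nodup_update _ _ h
            · intro a ha hna
              rcases (PySem.Set.mem_add _ _ _).mp ha with h | rfl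
              · exact absurd h hna
              · rfl
          cases hM : M.get? x with
          | none =>
              have hS2nil : M.getD x [] = [] := by
                rw [PySem.Dict.getD_eq_get?_getD, hM]
                rfl
              refine ⟨⟨hbase.1, hbase.2.1, hbase.2.2.1, hbase.2.2.2.1, ?_,
                hbase.2.2.2.2.1, hbase.2.2.2.2.2.1⟩, ?_⟩
              · intro a ha hna
                have hax := hbase.2.2.2.2.2.2 a ha hna
                subst hax
                refine ⟨(PySem.Set.mem_update _ _ _).mpr (Or.inr hxS), ?_⟩
                intro d hd
                have : d ∈ M.getD a [] := (hmem a d).mpr hd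
                rw [hS2nil] at this
                cases this
              · exact (PySem.Set.mem_add _ _ _).mpr (Or.inr rfl)
          | some S2 =>
              have hS2 : S2 = M.getD x [] := by
                rw [PySem.Dict.getD_eq_get?_getD, hM]
                rfl
              have hS2K : ∀ a ∈ S2, Kp a := by
                intro a ha
                rw [hS2] at ha
                exact hKcl x (hSK x hxS) a ((hmem x a).mp ha)
              have hfold := ihf.2 S2 S2 (PySem.Set.add st.1 x, PySem.Set.update st.2 S)
                (fun y hy => hy) hS2K hu2
              obtain ⟨hconclF, hinsF⟩ := hfold
              obtain ⟨m1', m2', b1', b2', cl', n1', n2'⟩ := hconclF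
              obtain ⟨m1, m2, b1, b2, n1, n2, hadd⟩ := hbase
              refine ⟨⟨?_, ?_, ?_, ?_, ?_, ?_, ?_⟩, ?_⟩
              · intro a h
                exact m1' a (m1 a h)
              · intro a h
                exact m2' a (m2 a h)
              · intro a h
                rcases b1' a h with h' | h'
                · exact b1 a h'
                · exact Or.inr h'
              · intro a h
                rcases b2' a h with h' | h'
                · exact b2 a h'
                · exact Or.inr h'
              · intro a ha hna
                by_cases hmid : a ∈ PySem.Set.add st.1 x
                · have hax := hadd a hmid hna
                  subst hax
                  refine ⟨m2' a ((PySem.Set.mem_update _ _ _).mpr (Or.inr hxS)), ?_⟩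
                  intro d hd
                  have hdS2 : d ∈ S2 := by
                    rw [hS2]
                    exact (hmem a d).mpr hd
                  exact hinsF d hdS2
                · exact cl' a ha hmid
              · intro h
                exact n1' (n1 h)
              · intro h
                exact n2' (n2 h)
              · exact m1' x ((PySem.Set.mem_add _ _ _).mpr (Or.inr rfl))
      refine ⟨htrav, ?_⟩
      intro ys
      induction ys with
      | nil =>
          intro S' st _ _ _
          exact ⟨pvTravConcl_refl il Kp st, by simp⟩
      | cons y ys ihys =>
          intro S' st hys hK hu
          rw [List.foldl_cons]
          have h1 := htrav y S' st (hys y (by simp)) hK hu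
          have humid : pvUnseen M (pvTravA M (f + 1) y S' st).1 < f + 1 :=
            lt_of_le_of_lt (pvUnseen_mono M h1.1.1) hu
          have h2 := ihys S' (pvTravA M (f + 1) y S' st) (fun z hz => hys z (by simp [hz])) hK humid
          refine ⟨pvTravConcl_trans il Kp h1.1 h2.1, ?_⟩
          intro z hz
          rcases List.mem_cons.mp hz with rfl | hz'
          · exact h2.1.1 z h1.2
          · exact h2.2 z hz'

-- ---- A computes pvComps: the main loop over the keys ----

lemma pvMain_aux (M : PySem.Dict Char (List Char)) (il : List String)
    (hmem : ∀ c d, d ∈ M.getD c [] ↔ pvRel il c d)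
    (hkeysiff : ∀ c, c ∈ M.keys ↔ c ∈ pvStream il) :
    ∀ (ks : List Char) (u : List Char) (out : List (List Char)),
    (∀ k ∈ ks, k ∈ M.keys) →
    ks.Pairwise (fun a b => (pvStream il).idxOf a < (pvStream il).idxOf b) →
    (∀ c, c ∈ u ↔ ∃ A ∈ out, c ∈ A) →
    (∀ a ∈ u, ∀ d, pvConn il a d → d ∈ u) →
    (∀ A ∈ out, A ≠ [] ∧ A.Nodup ∧ ∀ a ∈ A, a ∈ pvStream il) →
    (∀ A ∈ out, ∀ a ∈ A, ∀ d, (d ∈ A ↔ pvConn il a d)) →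
    out.Pairwise (fun A B => pvFirst il A < pvFirst il B) →
    (∀ A ∈ out, ∀ k ∈ ks, pvFirst il A < (pvStream il).idxOf k) →
    (∀ c ∈ pvStream il, c ∈ u ∨ c ∈ ks) →
    pvComps il (ks.foldl (fun (st : List Char × List (List Char)) k =>
        if ((M.getD k []).all fun c => PySem.Set.contains st.1 c) then st
        else
          (PySem.Set.update ((M.getD k []).foldl
              (fun st2 x => pvTravA M (M.size + 1) x (M.getD k []) st2)
              (st.1, PySem.Set.ofList (M.getD k []))).1 (M.getD k []),
           st.2 ++ [((M.getD k []).foldl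
              (fun st2 x => pvTravA M (M.size + 1) x (M.getD k []) st2)
              (st.1, PySem.Set.ofList (M.getD k []))).2])) (u, out)).2 := by
  intro ks
  induction ks with
  | nil =>
      intro u out _ _ hudone _ hout1 hout2 houtpair _ hcovdone
      rw [List.foldl_nil]
      refine ⟨hout1, hout2, ?_, houtpair⟩
      intro c hc
      rcases hcovdone c hc with hcu | hcks
      · exact (hudone c).mp hcu
      · cases hcks
  | cons k ks ih =>
      intro u out hks hkspair hudone huclosed hout1 hout2 houtpair houtlt hcovdone
      have hkK : k ∈ M.keys := hks k (by simp)
      have hkS : k ∈ pvStream il := (hkeysiff k).mp hkK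
      have hkself : k ∈ M.getD k [] := (hmem k k).mpr (pvRel_self il k hkS)
      rw [List.foldl_cons]
      by_cases hku : k ∈ u
      · have hall : ((M.getD k []).all fun c => PySem.Set.contains u c) = true := by
          apply List.all_eq_true.mpr
          intro c hc
          exact (PySem.Set.contains_iff _ _).mpr
            (huclosed k hku c (Relation.ReflTransGen.single ((hmem k c).mp hc)))
        rw [if_pos hall]
        refine ih u out (fun k' hk' => hks k' (by simp [hk'])) (List.pairwise_cons.mp hkspair).2
          hudone huclosed hout1 hout2 houtpair
          (fun A hA k' hk' => houtlt A hA k' (by simp [hk'])) ?_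
        intro c hc
        rcases hcovdone c hc with hcu | hcks
        · exact Or.inl hcu
        · rcases List.mem_cons.mp hcks with rfl | h
          · exact Or.inl hku
          · exact Or.inr h
      · have hallf : ¬(((M.getD k []).all fun c => PySem.Set.contains u c) = true) := by
          intro h
          exact hku ((PySem.Set.contains_iff _ _).mp (List.all_eq_true.mp h k hkself))
        rw [if_neg hallf]
        have hKcl : ∀ a, pvConn il k a → ∀ d, pvRel il a d → pvConn il k d :=
          fun a ha d hd => ha.tail hd
        have hKocc : ∀ a, pvConn il k a → a ∈ pvStream il :=
          fun a ha => pvConn_mem il hkS ha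
        have hSK : ∀ a ∈ M.getD k [], pvConn il k a :=
          fun a ha => Relation.ReflTransGen.single ((hmem k a).mp ha)
        have hult : pvUnseen M u < M.size + 1 := by
          have := pvUnseen_le M u
          omega
        obtain ⟨hconcl, hins⟩ := (pvTrav_spec M il (pvConn il k) hmem hkeysiff hKcl hKocc
          (M.size + 1)).2 (M.getD k []) (M.getD k []) (u, PySem.Set.ofList (M.getD k []))
          (fun y hy => hy) hSK hult
        obtain ⟨m1, m2, b1, b2, cl, n1, n2⟩ := hconcl
        set R := (M.getD k []).foldl
          (fun st2 x => pvTravA M (M.size + 1) x (M.getD k []) st2)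
          (u, PySem.Set.ofList (M.getD k [])) with hR
        have hu_not_comp : ∀ a, pvConn il k a → a ∉ u :=
          fun a hc ha => hku (huclosed a ha k (pvConn_symm il hc))
        have hcomp : ∀ d, pvConn il k d → d ∈ R.1 ∧ d ∈ R.2 := by
          intro d hc
          induction hc with
          | refl =>
              have hk1 : k ∈ R.1 := hins k hkself
              exact ⟨hk1, (cl k hk1 (hu_not_comp k Relation.ReflTransGen.refl)).1⟩
          | tail hkb hbd ihd =>
              have hbnot := hu_not_comp _ hkb
              have hdR : _ ∈ R.1 := (cl _ ihd.1 hbnot).2 _ hbd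
              exact ⟨hdR, (cl _ hdR (hu_not_comp _ (hkb.tail hbd))).1⟩
        have hR2iff : ∀ d, d ∈ R.2 ↔ pvConn il k d := by
          intro d
          constructor
          · intro hd
            rcases b2 d hd with h | h
            · exact Relation.ReflTransGen.single ((hmem k d).mp ((PySem.Set.mem_ofList _ _).mp h))
            · exact h
          · intro hc
            exact (hcomp d hc).2
        have hR1iff : ∀ a, a ∈ R.1 ↔ a ∈ u ∨ pvConn il k a := by
          intro a
          constructor
          · intro ha
            exact b1 a ha
          · intro ha
            rcases ha with ha | ha
            · exact m1 a ha
            · exact (hcomp a ha).1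
        have hkR2 : k ∈ R.2 := (hcomp k Relation.ReflTransGen.refl).2
        have hu'iff : ∀ c, c ∈ PySem.Set.update R.1 (M.getD k []) ↔ c ∈ u ∨ pvConn il k c := by
          intro c
          rw [PySem.Set.mem_update]
          constructor
          · rintro (h | h)
            · exact (hR1iff c).mp h
            · exact Or.inr (hSK c h)
          · intro h
            exact Or.inl ((hR1iff c).mpr h)
        have hfirst_new : pvFirst il R.2 = (pvStream il).idxOf k := by
          apply pvFirst_eq_idx il R.2 k hkR2 hkS
          intro a ha
          have hca : pvConn il k a := (hR2iff a).mp ha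
          have hanot := hu_not_comp a hca
          rcases hcovdone a (pvConn_mem il hkS hca) with h | h
          · exact absurd h hanot
          · rcases List.mem_cons.mp h with rfl | h'
            · exact le_refl _
            · exact le_of_lt (List.rel_of_pairwise_cons hkspair h')
        refine ih (PySem.Set.update R.1 (M.getD k [])) (out ++ [R.2])
          (fun k' hk' => hks k' (by simp [hk'])) (List.pairwise_cons.mp hkspair).2
          ?_ ?_ ?_ ?_ ?_ ?_ ?_
        · intro c
          rw [hu'iff c]
          constructor
          · rintro (h | h)
            · obtain ⟨A, hA, hcA⟩ := (hudone c).mp h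
              exact ⟨A, List.mem_append.mpr (Or.inl hA), hcA⟩
            · exact ⟨R.2, List.mem_append.mpr (Or.inr (by simp)), (hR2iff c).mpr h⟩
          · rintro ⟨A, hA, hcA⟩
            rcases List.mem_append.mp hA with hA | hA
            · exact Or.inl ((hudone c).mpr ⟨A, hA, hcA⟩)
            · rw [List.mem_singleton] at hA
              subst hA
              exact Or.inr ((hR2iff c).mp hcA)
        · intro a ha d hconn
          rw [hu'iff] at ha ⊢
          rcases ha with ha | ha
          · exact Or.inl (huclosed a ha d hconn)
          · exact Or.inr (ha.trans hconn)
        · intro A hA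
          rcases List.mem_append.mp hA with hA | hA
          · exact hout1 A hA
          · rw [List.mem_singleton] at hA
            subst hA
            exact ⟨List.ne_nil_of_mem hkR2, n2 (PySem.Set.nodup_ofList _),
              fun a ha => pvConn_mem il hkS ((hR2iff a).mp ha)⟩
        · intro A hA a ha d
          rcases List.mem_append.mp hA with hA | hA
          · exact hout2 A hA a ha d
          · rw [List.mem_singleton] at hA
            subst hA
            have hka : pvConn il k a := (hR2iff a).mp ha
            rw [hR2iff d]
            constructor
            · intro h
              exact (pvConn_symm il hka).trans h
            · intro h
              exact hka.trans h
        · refine List.pairwise_append.mpr ⟨houtpair, by simp, ?_⟩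
          intro A hA B hB
          rw [List.mem_singleton] at hB
          subst hB
          rw [hfirst_new]
          exact houtlt A hA k (by simp)
        · intro A hA k' hk'
          rcases List.mem_append.mp hA with hA | hA
          · exact houtlt A hA k' (by simp [hk'])
          · rw [List.mem_singleton] at hA
            subst hA
            rw [hfirst_new]
            exact List.rel_of_pairwise_cons hkspair hk'
        · intro c hc
          rcases hcovdone c hc with h | h
          · exact Or.inl ((hu'iff c).mpr (Or.inl h))
          · rcases List.mem_cons.mp h with rfl | h'
            · exact Or.inl ((hu'iff c).mpr (Or.inr Relation.ReflTransGen.refl))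
            · exact Or.inr h'

-- ---- A computes pvComps ----

lemma pvA_comps (il : List String) :
    pvComps il ((pvBuildA il).items.foldl (fun (st : List Char × List (List Char)) cS =>
      if (cS.2).all (fun c => PySem.Set.contains st.1 c) then st
      else
        let ident := PySem.Set.ofList cS.2
        let r := (cS.2).foldl (fun st2 x => pvTravA (pvBuildA il) ((pvBuildA il).size + 1) x cS.2 st2) (st.1, ident)
        (PySem.Set.update r.1 cS.2, st.2 ++ [r.2])) ([], [])).2 := by
  have hnd : (pvBuildA il).keys.Nodup := by
    rw [pvBuildA_keys]
    exact PySem.Set.nodup_ofList _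
  have hkeysiff : ∀ c, c ∈ (pvBuildA il).keys ↔ c ∈ pvStream il := by
    intro c
    rw [pvBuildA_keys]
    exact PySem.Set.mem_ofList _ c
  have hpairkeys : (pvBuildA il).keys.Pairwise
      (fun a b => (pvStream il).idxOf a < (pvStream il).idxOf b) := by
    rw [pvBuildA_keys]
    exact pvOfList_pairwise_idxOf _
  rw [PySem.Dict.items_eq_map_keys _ hnd ([] : List Char), List.foldl_map]
  exact pvMain_aux (pvBuildA il) il (pvBuildA_getD_mem il) hkeysiff (pvBuildA il).keys [] []
    (fun k hk => hk) hpairkeys (by simp) (by simp) (by simp) (by simp) (by simp) (by simp)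
    (fun c hc => Or.inr ((hkeysiff c).mpr hc))

-- ---- B computes pvComps ----

-- ---- B-side helper lemmas ----

lemma pvInterEmpty_iff (comp ws : List Char) :
    (PySem.Set.inter comp ws).isEmpty = true ↔ ∀ a ∈ comp, a ∉ ws := by
  rw [List.isEmpty_iff, List.eq_nil_iff_forall_not_mem]
  constructor
  · intro h a ha haws
    exact h a ((PySem.Set.mem_inter comp ws a).mpr ⟨ha, haws⟩)
  · intro h x hx
    obtain ⟨h1, h2⟩ := (PySem.Set.mem_inter comp ws x).mp hx
    exact h x h1 h2

lemma pvInterNonempty_iff (comp ws : List Char) :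
    (PySem.Set.inter comp ws).isEmpty = false ↔ ∃ a ∈ comp, a ∈ ws := by
  rw [← Bool.not_eq_true, pvInterEmpty_iff]
  constructor
  · intro h
    by_contra hc
    apply h
    intro a ha haws
    exact hc ⟨a, ha, haws⟩
  · rintro ⟨a, ha, haws⟩ hall
    exact hall a ha haws

-- the merged set built by B's first loop
def pvMergedOf (comps : List (List Char)) (w : String) : List Char :=
  comps.foldl (fun m comp =>
    if (PySem.Set.inter comp (PySem.Set.ofList w.toList)).isEmpty then m
    else PySem.Set.union m comp) (PySem.Set.ofList w.toList)

lemma pvMerged_mem_aux (ws : List Char) : ∀ (l : List (List Char)) (m0 : List Char) (x : Char),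
    (x ∈ l.foldl (fun m comp => if (PySem.Set.inter comp ws).isEmpty then m
        else PySem.Set.union m comp) m0)
      ↔ (x ∈ m0 ∨ ∃ comp ∈ l, (∃ a ∈ comp, a ∈ ws) ∧ x ∈ comp) := by
  intro l
  induction l with
  | nil => simp
  | cons comp l ih =>
      intro m0 x
      rw [List.foldl_cons]
      by_cases hc : (PySem.Set.inter comp ws).isEmpty = true
      · rw [if_pos hc, ih]
        have hno := (pvInterEmpty_iff comp ws).mp hc
        simp only [List.mem_cons]
        constructor
        · rintro (h | ⟨X, hX, hov, hx⟩)
          · exact Or.inl h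
          · exact Or.inr ⟨X, Or.inr hX, hov, hx⟩
        · rintro (h | ⟨X, (rfl | hX), hov, hx⟩)
          · exact Or.inl h
          · exfalso; obtain ⟨a, ha, haws⟩ := hov; exact hno a ha haws
          · exact Or.inr ⟨X, hX, hov, hx⟩
      · rw [if_neg hc, ih]
        have hov := (pvInterNonempty_iff comp ws).mp (by revert hc; cases h : (PySem.Set.inter comp ws).isEmpty <;> simp)
        rw [PySem.Set.mem_union]
        simp only [List.mem_cons]
        constructor
        · rintro ((h | h) | ⟨X, hX, hovX, hx⟩)
          · exact Or.inl h
          · exact Or.inr ⟨comp, Or.inl rfl, hov, h⟩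
          · exact Or.inr ⟨X, Or.inr hX, hovX, hx⟩
        · rintro (h | ⟨X, (rfl | hX), hovX, hx⟩)
          · exact Or.inl (Or.inl h)
          · exact Or.inl (Or.inr hx)
          · exact Or.inr ⟨X, hX, hovX, hx⟩

lemma pvMerged_mem (comps : List (List Char)) (w : String) (x : Char) :
    x ∈ pvMergedOf comps w ↔
      x ∈ w.toList ∨ ∃ comp ∈ comps, (∃ a ∈ comp, a ∈ w.toList) ∧ x ∈ comp := by
  unfold pvMergedOf
  rw [pvMerged_mem_aux]
  simp only [PySem.Set.mem_ofList]

lemma pvMerged_nodup_aux (ws : List Char) : ∀ (l : List (List Char)) (m0 : List Char), m0.Nodup →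
    (l.foldl (fun m comp => if (PySem.Set.inter comp ws).isEmpty then m
      else PySem.Set.union m comp) m0).Nodup := by
  intro l
  induction l with
  | nil => intro m0 h0; exact h0
  | cons comp l ih =>
      intro m0 h0
      rw [List.foldl_cons]
      split_ifs with hc
      · exact ih m0 h0
      · exact ih _ (PySem.Set.nodup_union _ _ h0)

lemma pvMerged_nodup (comps : List (List Char)) (w : String) : (pvMergedOf comps w).Nodup :=
  pvMerged_nodup_aux _ comps _ (PySem.Set.nodup_ofList _)

lemma pvRebuild_placed (ws merged : List Char) : ∀ (l acc : List (List Char)),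
    l.foldl (fun (st : List (List Char) × Bool) comp =>
        if (PySem.Set.inter comp ws).isEmpty then (st.1 ++ [comp], st.2)
        else if st.2 then st else (st.1 ++ [merged], true)) (acc, true)
      = (acc ++ l.filter (fun comp => (PySem.Set.inter comp ws).isEmpty), true) := by
  intro l
  induction l with
  | nil => intro acc; simp
  | cons comp l ih =>
      intro acc
      rw [List.foldl_cons, List.filter_cons]
      by_cases hc : (PySem.Set.inter comp ws).isEmpty = true
      · rw [if_pos hc, if_pos hc, ih]; simp
      · rw [if_neg hc, if_neg hc, if_pos rfl, ih]

lemma pvRebuild_clean (ws merged : List Char) : ∀ (l acc : List (List Char)),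
    (∀ X ∈ l, (PySem.Set.inter X ws).isEmpty = true) →
    l.foldl (fun (st : List (List Char) × Bool) comp =>
        if (PySem.Set.inter comp ws).isEmpty then (st.1 ++ [comp], st.2)
        else if st.2 then st else (st.1 ++ [merged], true)) (acc, false)
      = (acc ++ l, false) := by
  intro l
  induction l with
  | nil => intro acc _; simp
  | cons comp l ih =>
      intro acc h
      rw [List.foldl_cons, if_pos (h comp (by simp)), ih _ (fun X hX => h X (by simp [hX]))]
      simp

lemma pvRebuild_split (ws merged : List Char) : ∀ (l acc : List (List Char)),
    (∃ X ∈ l, (PySem.Set.inter X ws).isEmpty = false) →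
    ∃ pre C post, l = pre ++ C :: post ∧
      (∀ X ∈ pre, (PySem.Set.inter X ws).isEmpty = true) ∧
      (PySem.Set.inter C ws).isEmpty = false ∧
      l.foldl (fun (st : List (List Char) × Bool) comp =>
          if (PySem.Set.inter comp ws).isEmpty then (st.1 ++ [comp], st.2)
          else if st.2 then st else (st.1 ++ [merged], true)) (acc, false)
        = (acc ++ pre ++ merged :: post.filter (fun X => (PySem.Set.inter X ws).isEmpty), true) := by
  intro l
  induction l with
  | nil => rintro acc ⟨X, hX, _⟩; simp at hX
  | cons comp l ih =>
      intro acc hex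
      by_cases hc : (PySem.Set.inter comp ws).isEmpty = true
      · obtain ⟨X, hX, hXov⟩ := hex
        have hXl : X ∈ l := by
          rcases List.mem_cons.mp hX with rfl | h
          · rw [hc] at hXov; cases hXov
          · exact h
        obtain ⟨pre, C, post, hsplit, hpre, hC, hfold⟩ := ih (acc ++ [comp]) ⟨X, hXl, hXov⟩
        refine ⟨comp :: pre, C, post, by simp [hsplit], ?_, hC, ?_⟩
        · intro Y hY
          rcases List.mem_cons.mp hY with rfl | h
          · exact hc
          · exact hpre Y h
        · rw [List.foldl_cons, if_pos hc, hfold]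
          simp
      · have hcf : (PySem.Set.inter comp ws).isEmpty = false := by
          revert hc; cases h : (PySem.Set.inter comp ws).isEmpty <;> simp
        refine ⟨[], comp, l, by simp, by simp, hcf, ?_⟩
        rw [List.foldl_cons, if_neg hc, if_neg (by simp), pvRebuild_placed]
        simp

-- B's step under the three shapes
lemma pvStepB_of_empty (comps : List (List Char)) (w : String)
    (h : (PySem.Set.ofList w.toList).isEmpty = true) : pvStepB comps w = comps := by
  unfold pvStepB
  rw [if_pos h]

lemma pvStepB_of_clean (comps : List (List Char)) (w : String)
    (hne : (PySem.Set.ofList w.toList).isEmpty = false)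
    (hclean : ∀ X ∈ comps, (PySem.Set.inter X (PySem.Set.ofList w.toList)).isEmpty = true) :
    pvStepB comps w = comps ++ [pvMergedOf comps w] := by
  unfold pvStepB
  rw [if_neg (by simp [hne])]
  dsimp only
  rw [pvRebuild_clean _ _ _ _ hclean]
  rfl

lemma pvStepB_of_split (comps : List (List Char)) (w : String)
    (hne : (PySem.Set.ofList w.toList).isEmpty = false)
    (hex : ∃ X ∈ comps, (PySem.Set.inter X (PySem.Set.ofList w.toList)).isEmpty = false) :
    ∃ pre C post, comps = pre ++ C :: post ∧
      (∀ X ∈ pre, (PySem.Set.inter X (PySem.Set.ofList w.toList)).isEmpty = true) ∧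
      (PySem.Set.inter C (PySem.Set.ofList w.toList)).isEmpty = false ∧
      pvStepB comps w = pre ++ pvMergedOf comps w ::
        post.filter (fun X => (PySem.Set.inter X (PySem.Set.ofList w.toList)).isEmpty) := by
  obtain ⟨pre, C, post, hsplit, hpre, hC, hfold⟩ :=
    pvRebuild_split (PySem.Set.ofList w.toList) (pvMergedOf comps w) comps [] hex
  refine ⟨pre, C, post, hsplit, hpre, hC, ?_⟩
  unfold pvStepB
  rw [if_neg (by simp [hne])]
  dsimp only
  rw [show (comps.foldl (fun m comp =>
      if (PySem.Set.inter comp (PySem.Set.ofList w.toList)).isEmpty then m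
      else PySem.Set.union m comp) (PySem.Set.ofList w.toList)) = pvMergedOf comps w from rfl, hfold]
  simp

-- connectivity is monotone under appending a word; congruent under equal relations
lemma pvConn_mono (p : List String) (w : String) {a b : Char} (h : pvConn p a b) :
    pvConn (p ++ [w]) a b := by
  refine Relation.ReflTransGen.mono ?_ h
  rintro x y ⟨v, hv, h1, h2⟩
  exact ⟨v, List.mem_append.mpr (Or.inl hv), h1, h2⟩

lemma pvConn_congr (il il' : List String) (hr : ∀ a b, pvRel il a b ↔ pvRel il' a b)
    {a b : Char} (h : pvConn il a b) : pvConn il' a b :=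
  Relation.ReflTransGen.mono (fun x y hxy => (hr x y).mp hxy) h

lemma pvComps_congr (il il' : List String) (out : List (List Char))
    (hs : pvStream il' = pvStream il) (hr : ∀ a b, pvRel il' a b ↔ pvRel il a b)
    (h : pvComps il out) : pvComps il' out := by
  have hfirst : ∀ A, pvFirst il' A = pvFirst il A := by
    intro A; unfold pvFirst; rw [hs]
  refine ⟨?_, ?_, ?_, ?_⟩
  · intro A hA; have := h.1 A hA; rw [hs]; exact this
  · intro A hA a ha d
    rw [h.2.1 A hA a ha d]
    exact ⟨pvConn_congr il il' (fun x y => (hr x y).symm) , pvConn_congr il' il hr⟩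
  · intro c hc; rw [hs] at hc; exact h.2.2.1 c hc
  · refine h.2.2.2.imp_of_mem ?_
    intro A B _ _ hAB
    rw [hfirst A, hfirst B]; exact hAB

lemma pvFirst_lt_length (p : List String) (X : List Char)
    (hne : ∃ a ∈ X, a ∈ pvStream p) : pvFirst p X < (pvStream p).length := by
  obtain ⟨a, haX, haS⟩ := hne
  exact List.findIdx_lt_length.mpr ⟨a, haS, by simp [haX]⟩

lemma pvFirst_append_of_old (p : List String) (w : String) (X : List Char)
    (hne : ∃ a ∈ X, a ∈ pvStream p) : pvFirst (p ++ [w]) X = pvFirst p X := by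
  have hlt := pvFirst_lt_length p X hne
  unfold pvFirst at hlt ⊢
  rw [pvStream_append, pvStream_singleton, List.findIdx_append, if_pos hlt]

-- the main B step: one word preserves pvComps
lemma pvStepB_comps (p : List String) (w : String) (comps : List (List Char))
    (h : pvComps p comps) : pvComps (p ++ [w]) (pvStepB comps w) := by
  by_cases hemp : (PySem.Set.ofList w.toList).isEmpty = true
  · rw [pvStepB_of_empty comps w hemp]
    have hnil : w.toList = [] := by
      by_contra hc
      obtain ⟨x, hx⟩ := List.exists_mem_of_ne_nil _ hc
      have hx2 : x ∈ PySem.Set.ofList w.toList := (PySem.Set.mem_ofList _ _).mpr hx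
      rw [List.isEmpty_iff.mp hemp] at hx2
      simp at hx2
    apply pvComps_congr p (p ++ [w]) comps ?_ ?_ h
    · rw [pvStream_append, pvStream_singleton, hnil, List.append_nil]
    · intro a b
      rw [pvRel_append_singleton, hnil]
      simp
  · have hne : (PySem.Set.ofList w.toList).isEmpty = false := by
      revert hemp; cases h2 : (PySem.Set.ofList w.toList).isEmpty <;> simp
    have hcsne : w.toList ≠ [] := by
      intro hc
      rw [hc] at hne
      simp [PySem.Set.ofList] at hne
    obtain ⟨a0, ha0⟩ := List.exists_mem_of_ne_nil _ hcsne
    have hstream : pvStream (p ++ [w]) = pvStream p ++ w.toList := by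
      rw [pvStream_append, pvStream_singleton]
    have hrelP := pvRel_append_singleton p w
    obtain ⟨hcl1, hcl2, hcov, hpair⟩ := h
    have hMmem := pvMerged_mem comps w
    have hemptyX : ∀ X : List Char,
        ((PySem.Set.inter X (PySem.Set.ofList w.toList)).isEmpty = true ↔ ∀ a ∈ X, a ∉ w.toList) := by
      intro X
      rw [pvInterEmpty_iff]
      simp only [PySem.Set.mem_ofList]
    have hovX : ∀ X : List Char,
        ((PySem.Set.inter X (PySem.Set.ofList w.toList)).isEmpty = false ↔ ∃ a ∈ X, a ∈ w.toList) := by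
      intro X
      rw [pvInterNonempty_iff]
      simp only [PySem.Set.mem_ofList]
    have hwsM : ∀ x ∈ w.toList, x ∈ pvMergedOf comps w := fun x hx => (hMmem x).mpr (Or.inl hx)
    have hsubM : ∀ X ∈ comps, (∃ a ∈ X, a ∈ w.toList) → ∀ x ∈ X, x ∈ pvMergedOf comps w :=
      fun X hX hov x hx => (hMmem x).mpr (Or.inr ⟨X, hX, hov, hx⟩)
    have hConnM : ∀ x ∈ pvMergedOf comps w, pvConn (p ++ [w]) a0 x := by
      intro x hx
      rcases (hMmem x).mp hx with hxw | ⟨X, hX, ⟨y, hyX, hyw⟩, hxX⟩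
      · exact Relation.ReflTransGen.single ⟨w, by simp, ha0, hxw⟩
      · have h1 : pvConn (p ++ [w]) a0 y := Relation.ReflTransGen.single ⟨w, by simp, ha0, hyw⟩
        have h2 : pvConn p y x := (hcl2 X hX y hyX x).mp hxX
        exact h1.trans (pvConn_mono p w h2)
    have hClosedM : ∀ x ∈ pvMergedOf comps w, ∀ d, pvRel (p ++ [w]) x d → d ∈ pvMergedOf comps w := by
      intro x hx d hrel
      rcases (hrelP x d).mp hrel with hp | ⟨hxw, hdw⟩
      · rcases (hMmem x).mp hx with hxw | ⟨X, hX, hov, hxX⟩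
        · have hxS : x ∈ pvStream p := pvRel_left_mem p hp
          obtain ⟨X, hX, hxX⟩ := hcov x hxS
          exact hsubM X hX ⟨x, hxX, hxw⟩ d ((hcl2 X hX x hxX d).mpr (Relation.ReflTransGen.single hp))
        · exact hsubM X hX hov d ((hcl2 X hX x hxX d).mpr (Relation.ReflTransGen.single hp))
      · exact hwsM d hdw
    have hFullM : ∀ a ∈ pvMergedOf comps w, ∀ d, (d ∈ pvMergedOf comps w ↔ pvConn (p ++ [w]) a d) := by
      intro a ha d
      constructor
      · intro hd
        exact (pvConn_symm _ (hConnM a ha)).trans (hConnM d hd)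
      · intro hconn
        induction hconn with
        | refl => exact ha
        | tail hab hbc ih => exact hClosedM _ ih _ hbc
    have hFullOld : ∀ C ∈ comps, (∀ x ∈ C, x ∉ w.toList) →
        ∀ a ∈ C, ∀ d, (d ∈ C ↔ pvConn (p ++ [w]) a d) := by
      intro C hC hno a ha d
      constructor
      · intro hd
        exact pvConn_mono p w ((hcl2 C hC a ha d).mp hd)
      · intro hconn
        induction hconn with
        | refl => exact ha
        | tail hab hbc ih =>
            rcases (hrelP _ _).mp hbc with hp | ⟨hbw, hdw⟩
            · exact (hcl2 C hC _ ih _).mpr (Relation.ReflTransGen.single hp)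
            · exact absurd hbw (hno _ ih)
    have hMocc : ∀ x ∈ pvMergedOf comps w, x ∈ pvStream (p ++ [w]) := by
      intro x hx
      rw [hstream]
      rcases (hMmem x).mp hx with hxw | ⟨X, hX, _, hxX⟩
      · exact List.mem_append.mpr (Or.inr hxw)
      · exact List.mem_append.mpr (Or.inl ((hcl1 X hX).2.2 x hxX))
    have holdocc : ∀ X ∈ comps, ∀ x ∈ X, x ∈ pvStream (p ++ [w]) := by
      intro X hX x hx
      rw [hstream]
      exact List.mem_append.mpr (Or.inl ((hcl1 X hX).2.2 x hx))
    have hMne : pvMergedOf comps w ≠ [] := by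
      intro hc
      have := hwsM a0 ha0
      rw [hc] at this
      simp at this
    have hMnodup := pvMerged_nodup comps w
    have hold : ∀ X ∈ comps, ∃ a ∈ X, a ∈ pvStream p := by
      intro X hX
      obtain ⟨x, hx⟩ := List.exists_mem_of_ne_nil _ (hcl1 X hX).1
      exact ⟨x, hx, (hcl1 X hX).2.2 x hx⟩
    have hfindIdx_ge : ∀ (n : Nat) (A : List Char),
        n ≤ (pvStream (p ++ [w])).length →
        (∀ j, (hj : j < (pvStream (p ++ [w])).length) → j < n → (pvStream (p ++ [w]))[j] ∉ A) →
        n ≤ pvFirst (p ++ [w]) A := by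
      intro n A hn hall
      by_contra hc
      have h1 : pvFirst (p ++ [w]) A < n := by omega
      have h2 : pvFirst (p ++ [w]) A < (pvStream (p ++ [w])).length := by omega
      have hg := List.findIdx_getElem (p := fun c => decide (c ∈ A)) (xs := pvStream (p ++ [w])) (w := h2)
      exact hall _ h2 h1 (by simpa using hg)
    have hstreamP_getElem : ∀ j (hjp : j < (pvStream p).length),
        (pvStream (p ++ [w]))[j]'(by rw [hstream]; simp; omega) = (pvStream p)[j] := by
      intro j hjp
      have : (pvStream p ++ w.toList)[j]'(by simp; omega) = (pvStream p)[j] :=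
        List.getElem_append_left hjp
      simp only [hstream]
      exact this
    by_cases hclean : ∀ X ∈ comps, (PySem.Set.inter X (PySem.Set.ofList w.toList)).isEmpty = true
    · rw [pvStepB_of_clean comps w hne hclean]
      have hMws : ∀ x, x ∈ pvMergedOf comps w ↔ x ∈ w.toList := by
        intro x
        rw [hMmem x]
        constructor
        · rintro (hx | ⟨X, hX, ⟨a, haX, haw⟩, _⟩)
          · exact hx
          · exact absurd haw ((hemptyX X).mp (hclean X hX) a haX)
        · exact Or.inl
      have hMhigh : (pvStream p).length ≤ pvFirst (p ++ [w]) (pvMergedOf comps w) := by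
        apply hfindIdx_ge _ _ (by rw [hstream, List.length_append]; omega)
        intro j hj hjn
        rw [hstreamP_getElem j hjn]
        intro hM
        have hxw := (hMws _).mp hM
        have hxS : (pvStream p)[j] ∈ pvStream p := List.getElem_mem _
        obtain ⟨X, hX, hxX⟩ := hcov _ hxS
        exact (hemptyX X).mp (hclean X hX) _ hxX hxw
      refine ⟨?_, ?_, ?_, ?_⟩
      · intro A hA
        rcases List.mem_append.mp hA with hA | hA
        · refine ⟨(hcl1 A hA).1, (hcl1 A hA).2.1, holdocc A hA⟩
        · rw [List.mem_singleton] at hA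
          subst hA
          exact ⟨hMne, hMnodup, hMocc⟩
      · intro A hA a ha d
        rcases List.mem_append.mp hA with hA | hA
        · exact hFullOld A hA ((hemptyX A).mp (hclean A hA)) a ha d
        · rw [List.mem_singleton] at hA
          subst hA
          exact hFullM a ha d
      · intro c hc
        rw [hstream] at hc
        rcases List.mem_append.mp hc with hc | hc
        · obtain ⟨X, hX, hcX⟩ := hcov c hc
          exact ⟨X, List.mem_append.mpr (Or.inl hX), hcX⟩
        · exact ⟨pvMergedOf comps w, List.mem_append.mpr (Or.inr (by simp)), hwsM c hc⟩
      · refine List.pairwise_append.mpr ⟨?_, by simp, ?_⟩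
        · refine hpair.imp_of_mem ?_
          intro A B hA hB hAB
          rw [pvFirst_append_of_old p w A (hold A hA), pvFirst_append_of_old p w B (hold B hB)]
          exact hAB
        · intro A hA B hB
          rw [List.mem_singleton] at hB
          subst hB
          rw [pvFirst_append_of_old p w A (hold A hA)]
          have := pvFirst_lt_length p A (hold A hA)
          omega
    · have hex : ∃ X ∈ comps, (PySem.Set.inter X (PySem.Set.ofList w.toList)).isEmpty = false := by
        by_contra hc
        apply hclean
        intro X hX
        rcases Bool.eq_false_or_eq_true ((PySem.Set.inter X (PySem.Set.ofList w.toList)).isEmpty) with ht | hf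
        · exact ht
        · exact absurd ⟨X, hX, hf⟩ hc

      obtain ⟨pre, C1, post, hsplit, hpre, hC1, hstep⟩ := pvStepB_of_split comps w hne hex
      rw [hstep]
      have hC1mem : C1 ∈ comps := by rw [hsplit]; simp
      have hpremem : ∀ X ∈ pre, X ∈ comps := by intro X hX; rw [hsplit]; simp [hX]
      have hpostmem : ∀ X ∈ post, X ∈ comps := by intro X hX; rw [hsplit]; simp [hX]
      have hC1ov : ∃ a ∈ C1, a ∈ w.toList := (hovX C1).mp hC1
      have hpair' : (pre ++ C1 :: post).Pairwise (fun A B => pvFirst p A < pvFirst p B) := by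
        rw [← hsplit]; exact hpair
      obtain ⟨hpairPre, hpairCpost, hcross⟩ := List.pairwise_append.mp hpair'
      obtain ⟨hC1lt, hpairPost⟩ := List.pairwise_cons.mp hpairCpost
      have hlenC1 : pvFirst p C1 < (pvStream p).length := pvFirst_lt_length p C1 (hold C1 hC1mem)
      have hhit : (pvStream p)[pvFirst p C1]'hlenC1 ∈ C1 := by
        have hl : List.findIdx (fun c => decide (c ∈ C1)) (pvStream p) < (pvStream p).length := hlenC1
        have hg := List.findIdx_getElem (w := hl)
        simpa [pvFirst] using hg
      have hub : pvFirst (p ++ [w]) (pvMergedOf comps w) ≤ pvFirst p C1 := by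
        apply pvFindIdx_le _ _ _ (by rw [hstream, List.length_append]; omega)
        rw [hstreamP_getElem _ hlenC1]
        simpa using hsubM C1 hC1mem hC1ov _ hhit
      have hlb : pvFirst p C1 ≤ pvFirst (p ++ [w]) (pvMergedOf comps w) := by
        apply hfindIdx_ge _ _ (by rw [hstream, List.length_append]; omega)
        intro j hj hjn
        have hjp : j < (pvStream p).length := by omega
        rw [hstreamP_getElem j hjp]
        intro hM
        have hxS : (pvStream p)[j] ∈ pvStream p := List.getElem_mem _
        have hXex : ∃ X ∈ comps, (∃ a ∈ X, a ∈ w.toList) ∧ (pvStream p)[j] ∈ X := by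
          rcases (hMmem _).mp hM with hxw | ⟨X, hX, hov, hxX⟩
          · obtain ⟨X, hX, hxX⟩ := hcov _ hxS
            exact ⟨X, hX, ⟨_, hxX, hxw⟩, hxX⟩
          · exact ⟨X, hX, hov, hxX⟩
        obtain ⟨X, hX, hXov, hxX⟩ := hXex
        have hXle : pvFirst p X ≤ j := pvFindIdx_le _ _ _ hjp (by simp [hxX])
        rw [hsplit] at hX
        rcases List.mem_append.mp hX with hXpre | hXc
        · have h1 := hpre X hXpre
          have h2 := (hovX X).mpr hXov
          rw [h1] at h2
          cases h2
        · rcases List.mem_cons.mp hXc with rfl | hXpost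
          · omega
          · have := hC1lt X hXpost
            omega
      have hMfirst : pvFirst (p ++ [w]) (pvMergedOf comps w) = pvFirst p C1 := le_antisymm hub hlb
      have hfiltmem : ∀ X ∈ post.filter
          (fun X => (PySem.Set.inter X (PySem.Set.ofList w.toList)).isEmpty),
          X ∈ post ∧ (∀ a ∈ X, a ∉ w.toList) := by
        intro X hX
        rw [List.mem_filter] at hX
        exact ⟨hX.1, (hemptyX X).mp hX.2⟩
      refine ⟨?_, ?_, ?_, ?_⟩
      · intro A hA
        rcases List.mem_append.mp hA with hApre | hAc
        · exact ⟨(hcl1 A (hpremem A hApre)).1, (hcl1 A (hpremem A hApre)).2.1,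
            holdocc A (hpremem A hApre)⟩
        · rcases List.mem_cons.mp hAc with rfl | hAf
          · exact ⟨hMne, hMnodup, hMocc⟩
          · have hApost := (hfiltmem A hAf).1
            exact ⟨(hcl1 A (hpostmem A hApost)).1, (hcl1 A (hpostmem A hApost)).2.1,
              holdocc A (hpostmem A hApost)⟩
      · intro A hA a ha d
        rcases List.mem_append.mp hA with hApre | hAc
        · exact hFullOld A (hpremem A hApre) ((hemptyX A).mp (hpre A hApre)) a ha d
        · rcases List.mem_cons.mp hAc with rfl | hAf
          · exact hFullM a ha d
          · exact hFullOld A (hpostmem A (hfiltmem A hAf).1) (hfiltmem A hAf).2 a ha d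
      · intro c hc
        rw [hstream] at hc
        rcases List.mem_append.mp hc with hc | hc
        · obtain ⟨X, hX, hcX⟩ := hcov c hc
          rw [hsplit] at hX
          rcases List.mem_append.mp hX with hXpre | hXc
          · exact ⟨X, List.mem_append.mpr (Or.inl hXpre), hcX⟩
          · rcases List.mem_cons.mp hXc with rfl | hXpost
            · exact ⟨pvMergedOf comps w, by simp, hsubM X hC1mem hC1ov c hcX⟩
            · by_cases hXe : (PySem.Set.inter X (PySem.Set.ofList w.toList)).isEmpty = true
              · refine ⟨X, ?_, hcX⟩
                simp only [List.mem_append, List.mem_cons]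
                exact Or.inr (Or.inr (List.mem_filter.mpr ⟨hXpost, hXe⟩))
              · have hXf : ∃ a ∈ X, a ∈ w.toList := (hovX X).mp (by
                  revert hXe
                  cases hb : (PySem.Set.inter X (PySem.Set.ofList w.toList)).isEmpty <;> simp)
                exact ⟨pvMergedOf comps w, by simp, hsubM X (hpostmem X hXpost) hXf c hcX⟩
        · exact ⟨pvMergedOf comps w, by simp, hwsM c hc⟩
      · have hfirstPre : ∀ X ∈ pre, pvFirst (p ++ [w]) X = pvFirst p X :=
          fun X hX => pvFirst_append_of_old p w X (hold X (hpremem X hX))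
        have hfirstPost : ∀ X ∈ post, pvFirst (p ++ [w]) X = pvFirst p X :=
          fun X hX => pvFirst_append_of_old p w X (hold X (hpostmem X hX))
        refine List.pairwise_append.mpr ⟨?_, ?_, ?_⟩
        · refine hpairPre.imp_of_mem ?_
          intro A B hA hB hAB
          rw [hfirstPre A hA, hfirstPre B hB]
          exact hAB
        · refine List.pairwise_cons.mpr ⟨?_, ?_⟩
          · intro Y hY
            have hYpost := (hfiltmem Y hY).1
            rw [hMfirst, hfirstPost Y hYpost]
            exact hC1lt Y hYpost
          · refine (List.Pairwise.sublist List.filter_sublist hpairPost).imp_of_mem ?_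
            intro A B hA hB hAB
            rw [hfirstPost A (hfiltmem A hA).1, hfirstPost B (hfiltmem B hB).1]
            exact hAB
        · intro A hA B hB
          rcases List.mem_cons.mp hB with rfl | hBf
          · rw [hfirstPre A hA, hMfirst]
            exact hcross A hA C1 (by simp)
          · rw [hfirstPre A hA, hfirstPost B (hfiltmem B hBf).1]
            exact hcross A hA B (by simp [(hfiltmem B hBf).1])

lemma pvB_comps (il : List String) : pvComps il (il.foldl pvStepB []) := by
  induction il using List.reverseRecOn with
  | nil =>
      refine ⟨by simp, by simp, ?_, by simp⟩
      intro c hc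
      simp [pvStream] at hc
  | append_singleton p w ih =>
      rw [List.foldl_append, List.foldl_cons, List.foldl_nil]
      exact pvStepB_comps p w _ ih

-- ===== VERDICT (by name: the statement is the Claim_ definition above) =====
-- map pvCanon over two pointwise set-equal nodup lists gives the same list
lemma pvMap_canon_eq (L1 L2 : List (List Char))
    (h : List.Forall₂ (fun A B => ∀ x, x ∈ A ↔ x ∈ B) L1 L2)
    (h1 : ∀ A ∈ L1, A.Nodup) (h2 : ∀ B ∈ L2, B.Nodup) :
    L1.map pvCanon = L2.map pvCanon := by
  induction h with
  | nil => rfl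
  | @cons A B L1' L2' hAB _ ih =>
      simp only [List.map_cons]
      rw [pvCanon_congr A B (h1 A (by simp)) (h2 B (by simp)) hAB,
        ih (fun X hX => h1 X (by simp [hX])) (fun X hX => h2 X (by simp [hX]))]

theorem interlink_alg_spec : Claim_equal_interlink_alg := by
  intro il _
  unfold Spec_interlink_alg interlink_alg interlink_alg_alt
  have hA := pvA_comps il
  have hB := pvB_comps il
  exact pvMap_canon_eq _ _ (pvComps_unique il _ _ hA hB)
    (fun A hAm => ((hA.1 A hAm).2.1)) (fun B hBm => ((hB.1 B hBm).2.1))
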